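-- pv_equiv track=rewrite | github.com/Guidosalimbeni/SmeHub_api | report_generator.py | _prepare_search_context
-- ===== SOURCE A (Python) =====
-- from typing import List, Dict, Any
--
-- def _prepare_search_context(search_results: List[Dict[str, Any]]) -> str:
--     """
--     Prepare search results as context for Claude AI.
--     """
--     if not search_results:
--         return "No current market data available."
--
--     context_parts = []
--
--     # Group results by query for better organization
--     query_groups = {}
--     for result in search_results:
--         query = result.get('query', 'general')
--         if query not in query_groups:
--             query_groups[query] = []
--         query_groups[query].append(result)
--
--     for query, results in query_groups.items():
--         context_parts.append(f"\n=== Search Results for: {query} ===")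
--
--         for result in results[:3]:  # Limit to top 3 results per query
--             if result.get('content'):
--                 context_parts.append(f"Title: {result.get('title', 'N/A')}")
--                 context_parts.append(f"Content: {result.get('content', '')[:500]}...")  # Limit content length
--                 context_parts.append(f"Source: {result.get('url', 'N/A')}")
--                 context_parts.append("---")
--
--     return "\n".join(context_parts)
-- ===== SOURCE B (Python) =====
-- from typing import List, Dict, Any
--
--
-- def _entry_lines(result: Dict[str, Any]) -> List[str]:
--     if not result.get('content'):
--         return []
--     return [
--         f"Title: {result.get('title', 'N/A')}",
--         f"Content: {result.get('content', '')[:500]}...",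
--         f"Source: {result.get('url', 'N/A')}",
--         "---",
--     ]
--
--
-- def _query_block(search_results: List[Dict[str, Any]], query: str) -> List[str]:
--     matched = [r for r in search_results if r.get('query', 'general') == query][:3]
--     return [f"\n=== Search Results for: {query} ==="] + \
--         [line for r in matched for line in _entry_lines(r)]
--
--
-- def _prepare_search_context(search_results: List[Dict[str, Any]]) -> str:
--     """
--     Prepare search results as context for Claude AI.
--     """
--     if not search_results:
--         return "No current market data available."
--     queries = list(dict.fromkeys(r.get('query', 'general') for r in search_results))
--     return "\n".join(line for q in queries for line in _query_block(search_results, q))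
-- ===== Notes on version B (the rewrite author's own statement) =====
-- stated objective: alternative
-- what changed: B drops A's dict-of-lists group index: it computes the ordered distinct query keys once (dict.fromkeys) and, per key, rescans the input selecting the first three matching results, emitting each block with comprehensions instead of append loops.
import Mathlib
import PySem

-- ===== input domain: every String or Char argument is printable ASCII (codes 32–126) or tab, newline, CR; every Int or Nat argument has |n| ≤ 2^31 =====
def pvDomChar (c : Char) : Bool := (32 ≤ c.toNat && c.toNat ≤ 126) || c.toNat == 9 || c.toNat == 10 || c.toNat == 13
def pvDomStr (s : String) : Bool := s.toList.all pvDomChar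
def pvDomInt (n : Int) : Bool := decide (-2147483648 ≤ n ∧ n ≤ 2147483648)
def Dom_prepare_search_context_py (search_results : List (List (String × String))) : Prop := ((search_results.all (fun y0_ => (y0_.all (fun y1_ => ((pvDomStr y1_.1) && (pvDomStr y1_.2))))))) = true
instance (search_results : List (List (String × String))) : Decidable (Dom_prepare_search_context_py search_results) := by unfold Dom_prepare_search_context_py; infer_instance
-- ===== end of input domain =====

-- B replaces A's dict-of-lists grouping by a one-pass ordered dedup of the query keys plus a
-- per-query rescan of the input list (alternative decomposition, same output).


-- ===== PORT A =====
-- result.get(k, d): first-match lookup in the association list (a Python dict has unique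
-- keys); shared by both ports
def pvGet (r : List (String × String)) (k d : String) : String :=
  PySem.Dict.getD (PySem.Dict.mk r) k d

def prepare_search_context_py (search_results : List (List (String × String))) : String :=
  if search_results = [] then "No current market data available."
  else
    -- group results by query (dict insertion order)
    let query_groups : PySem.Dict String (List (List (String × String))) :=
      search_results.foldl (fun g r =>
        let q := pvGet r "query" "general"
        let g1 := if g.contains q then g else g.insert q []
        g1.modify q [] (fun l => l ++ [r])) PySem.Dict.empty
    let context_parts : List String :=
      query_groups.items.foldl (fun parts qr =>
        let parts := parts ++ ["\n=== Search Results for: " ++ qr.1 ++ " ==="]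
        (qr.2.take 3).foldl (fun parts r =>
          if pvGet r "content" "" ≠ "" then
            parts ++ ["Title: " ++ pvGet r "title" "N/A",
                      -- content[:500] is the first 500 characters
                      "Content: " ++ String.ofList ((pvGet r "content" "").toList.take 500) ++ "...",
                      "Source: " ++ pvGet r "url" "N/A",
                      "---"]
          else parts) parts) []
    PySem.Str.join "\n" context_parts

-- ===== PORT B =====
def pvEntryLinesB (r : List (String × String)) : List String :=
  if pvGet r "content" "" = "" then []
  else ["Title: " ++ pvGet r "title" "N/A",
        "Content: " ++ String.ofList ((pvGet r "content" "").toList.take 500) ++ "...",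
        "Source: " ++ pvGet r "url" "N/A",
        "---"]

def pvQueryBlockB (search_results : List (List (String × String))) (q : String) : List String :=
  ("\n=== Search Results for: " ++ q ++ " ===") ::
    ((search_results.filter (fun r => pvGet r "query" "general" == q)).take 3).flatMap pvEntryLinesB

def prepare_search_context_py_alt (search_results : List (List (String × String))) : String :=
  if search_results = [] then "No current market data available."
  else
    PySem.Str.join "\n"
      ((PySem.List.dedup (search_results.map (fun r => pvGet r "query" "general"))).flatMap
        (pvQueryBlockB search_results))

-- ===== PRECONDITION & SPEC =====
def Spec_prepare_search_context_py (search_results : List (List (String × String))) (out : String) : Prop := out = prepare_search_context_py_alt search_results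
instance (search_results : List (List (String × String))) (out : String) : Decidable (Spec_prepare_search_context_py search_results out) := by unfold Spec_prepare_search_context_py; infer_instance

-- ===== CLAIM (what is proved, stated in full; the proofs are below) =====
def Claim_equal_prepare_search_context_py : Prop := ∀ (search_results : List (List (String × String))), Dom_prepare_search_context_py search_results → Spec_prepare_search_context_py search_results (prepare_search_context_py search_results)

-- ===== LEMMAS AND PROOFS =====

-- A's "if query not in groups: groups[query] = []" followed by the append is one modify step
theorem pv_stepA_eq_modify (g : PySem.Dict String (List (List (String × String))))
    (q : String) (r : List (String × String)) :
    (if g.contains q then g else g.insert q []).modify q [] (fun l => l ++ [r])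
      = g.modify q [] (fun l => l ++ [r]) := by
  by_cases h : g.contains q = true
  · simp [h]
  · simp only [Bool.not_eq_true] at h
    simp only [PySem.Dict.modify, h, Bool.false_eq_true, if_false]
    rw [PySem.Dict.getD_insert_self, PySem.Dict.insert_insert_self,
        PySem.Dict.getD_of_not_contains _ _ h]

-- A's inner loop over one group appends exactly the entry lines of its content-bearing results
theorem pv_inner (l : List (List (String × String))) (parts : List String) :
    l.foldl (fun parts r =>
        if pvGet r "content" "" ≠ "" then
          parts ++ ["Title: " ++ pvGet r "title" "N/A",
                    "Content: " ++ String.ofList ((pvGet r "content" "").toList.take 500) ++ "...",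
                    "Source: " ++ pvGet r "url" "N/A",
                    "---"]
        else parts) parts
      = parts ++ l.flatMap pvEntryLinesB := by
  induction l generalizing parts with
  | nil => simp
  | cons r rs ih =>
      rw [List.foldl_cons, ih, List.flatMap_cons]
      by_cases h : pvGet r "content" "" = ""
      · simp [h, pvEntryLinesB]
      · simp [h, pvEntryLinesB, List.append_assoc]

-- A's outer loop over the (query, group) pairs emits B's blocks in order
theorem pv_outer (sr : List (List (String × String))) (l : List String) (parts : List String) :
    l.foldl (fun parts q =>
        ((sr.filter (fun r => pvGet r "query" "general" == q)).take 3).foldl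
          (fun parts r =>
            if pvGet r "content" "" ≠ "" then
              parts ++ ["Title: " ++ pvGet r "title" "N/A",
                        "Content: " ++ String.ofList ((pvGet r "content" "").toList.take 500) ++ "...",
                        "Source: " ++ pvGet r "url" "N/A",
                        "---"]
            else parts)
          (parts ++ ["\n=== Search Results for: " ++ q ++ " ==="])) parts
      = parts ++ l.flatMap (pvQueryBlockB sr) := by
  induction l generalizing parts with
  | nil => simp
  | cons q qs ih =>
      rw [List.foldl_cons, pv_inner, ih, List.flatMap_cons, pvQueryBlockB]
      simp [List.append_assoc]

theorem prepare_search_context_py_spec' (search_results : List (List (String × String))) :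
    prepare_search_context_py search_results = prepare_search_context_py_alt search_results := by
  unfold prepare_search_context_py prepare_search_context_py_alt
  by_cases hnil : search_results = []
  · simp [hnil]
  · simp only [hnil, if_false]
    -- rewrite A's grouping loop into the canonical modify loop
    have hfold :
        search_results.foldl (fun g r =>
          let q := pvGet r "query" "general"
          let g1 := if g.contains q then g else g.insert q []
          g1.modify q [] (fun l => l ++ [r])) PySem.Dict.empty
        = search_results.foldl (fun g r =>
            g.modify (pvGet r "query" "general") [] (fun l => l ++ [r])) PySem.Dict.empty := by
      apply PySem.List.foldl_congr_mem
      intro g r _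
      simpa using pv_stepA_eq_modify g (pvGet r "query" "general") r
    rw [hfold]
    have hnodup :
        (search_results.foldl (fun g r =>
          g.modify (pvGet r "query" "general") [] (fun l => l ++ [r])) PySem.Dict.empty).keys.Nodup :=
      PySem.Dict.nodup_keys_foldl_modify_key search_results (fun r => pvGet r "query" "general") []
        (fun _ r l => l ++ [r]) PySem.Dict.empty PySem.Dict.nodup_keys_empty
    have hkeys :
        (search_results.foldl (fun g r =>
          g.modify (pvGet r "query" "general") [] (fun l => l ++ [r])) PySem.Dict.empty).keys
        = PySem.List.dedup (search_results.map (fun r => pvGet r "query" "general")) := by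
      rw [PySem.Dict.keys_foldl_modify_key search_results (fun r => pvGet r "query" "general") []
        (fun _ r l => l ++ [r]) PySem.Dict.empty, PySem.List.dedup_eq_ofList]
      rfl
    have hgetD : ∀ q,
        (search_results.foldl (fun g r =>
          g.modify (pvGet r "query" "general") [] (fun l => l ++ [r])) PySem.Dict.empty).getD q []
        = search_results.filter (fun r => pvGet r "query" "general" == q) := by
      intro q
      have h := PySem.Dict.getD_foldl_modify_append
        (search_results.map (fun r => (pvGet r "query" "general", r))) PySem.Dict.empty q
      rw [List.foldl_map] at h
      simp only [h, PySem.Dict.getD_empty, List.nil_append, List.filter_map]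
      simp [Function.comp_def]
    have hitems :
        (search_results.foldl (fun g r =>
          g.modify (pvGet r "query" "general") [] (fun l => l ++ [r])) PySem.Dict.empty).items
        = (PySem.List.dedup (search_results.map (fun r => pvGet r "query" "general"))).map
            (fun q => (q, search_results.filter (fun r => pvGet r "query" "general" == q))) := by
      rw [PySem.Dict.items_eq_map_keys _ hnodup [], hkeys]
      exact List.map_congr_left (fun q _ => by rw [hgetD q])
    congr 1
    rw [hitems, List.foldl_map]
    simpa using pv_outer search_results
      (PySem.List.dedup (search_results.map (fun r => pvGet r "query" "general"))) []

-- ===== VERDICT (by name: the statement is the Claim_ definition above) =====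
theorem prepare_search_context_py_spec : Claim_equal_prepare_search_context_py := by
  intro search_results _
  unfold Spec_prepare_search_context_py
  exact prepare_search_context_py_spec' search_results
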